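-- pv_equiv track=rewrite | github.com/agpar/advent2017 | day4/day4.py | is_phrase_valid1
-- ===== SOURCE A (Python) =====
-- def is_phrase_valid1(phrase):
-- 	words = phrase.split(' ')
-- 	seen = set()
-- 	for word in words:
-- 		if word in seen:
-- 			return False
-- 		seen.add(word)
-- 	return True
-- ===== SOURCE B (Python) =====
-- def is_phrase_valid1(phrase):
--     words = sorted(phrase.split(' '))
--     return all(a != b for a, b in zip(words, words[1:]))
-- ===== Notes on version B (the rewrite author's own statement) =====
-- stated objective: alternative
-- what changed: Replaces A's one-pass hash-set membership loop with early exit by sort-then-scan: sort the words and check that no two adjacent words are equal, with no set and no early return.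
import Mathlib
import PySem

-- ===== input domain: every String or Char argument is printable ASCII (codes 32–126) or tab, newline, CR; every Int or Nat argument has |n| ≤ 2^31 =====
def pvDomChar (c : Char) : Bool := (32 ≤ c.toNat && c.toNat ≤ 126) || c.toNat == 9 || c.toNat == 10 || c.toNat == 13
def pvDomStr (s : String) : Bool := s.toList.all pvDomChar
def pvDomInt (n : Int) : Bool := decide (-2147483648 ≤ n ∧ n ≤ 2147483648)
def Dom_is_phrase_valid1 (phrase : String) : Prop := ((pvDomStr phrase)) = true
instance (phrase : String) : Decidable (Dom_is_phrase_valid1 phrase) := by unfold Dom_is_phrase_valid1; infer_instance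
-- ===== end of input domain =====

-- B replaces A's seen-set loop with early return by sort-then-adjacent-scan (alternative algorithm).

-- ===== PORT A =====
-- phrase.split(' '): sep is the non-empty " ", so Str.split? is always `some`; getD [] never fires
def pvSplitSpace (phrase : String) : List String := (PySem.Str.split? phrase " ").getD []

-- the 'for word in words' loop with its early 'return False'
def pvLoopA (words : List String) (seen : PySem.Set String) : Bool :=
  match words with
  | [] => true
  | w :: rest => if PySem.Set.contains seen w then false else pvLoopA rest (PySem.Set.add seen w)

def is_phrase_valid1 (phrase : String) : Bool :=
  pvLoopA (pvSplitSpace phrase) PySem.Set.empty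

-- ===== PORT B =====
-- all(a != b for a, b in zip(words, words[1:]))
def pvAdjAllNe (ws : List String) : Bool :=
  (ws.zip (PySem.List.slice ws (some 1) none)).all (fun p => p.1 != p.2)

def is_phrase_valid1_alt (phrase : String) : Bool :=
  let words := PySem.List.sorted (pvSplitSpace phrase) (fun x => x) false
  pvAdjAllNe words

-- ===== PRECONDITION & SPEC =====
def Spec_is_phrase_valid1 (phrase : String) (out : Bool) : Prop := out = is_phrase_valid1_alt phrase
instance (phrase : String) (out : Bool) : Decidable (Spec_is_phrase_valid1 phrase out) := by unfold Spec_is_phrase_valid1; infer_instance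

-- ===== CLAIM (what is proved, stated in full; the proofs are below) =====
def Claim_equal_is_phrase_valid1 : Prop := ∀ (phrase : String), Dom_is_phrase_valid1 phrase → Spec_is_phrase_valid1 phrase (is_phrase_valid1 phrase)

-- ===== LEMMAS AND PROOFS =====

-- A's loop returns true iff the remaining words are distinct and none is already seen
theorem pvLoopA_iff (l : List String) (s : PySem.Set String) :
    pvLoopA l s = true ↔ l.Nodup ∧ ∀ x ∈ l, x ∉ s := by
  induction l generalizing s with
  | nil => simp [pvLoopA]
  | cons w rest ih =>
    simp only [pvLoopA]
    by_cases h : PySem.Set.contains s w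
    · have hw : w ∈ s := by
        simpa [PySem.Set.contains] using h
      rw [if_pos h]
      simp only [Bool.false_eq_true, false_iff, List.nodup_cons, not_and]
      intro _ hall
      exact hall w (by simp) hw
    · rw [if_neg h, ih]
      have hw : w ∉ s := by
        intro hm; exact h (by simpa [PySem.Set.contains] using hm)
      have hmemadd : ∀ x, x ∈ PySem.Set.add s w ↔ x ∈ s ∨ x = w := by
        intro x; rw [PySem.Set.mem_add]
      constructor
      · rintro ⟨hnd, hall⟩
        refine ⟨List.nodup_cons.2 ⟨?_, hnd⟩, ?_⟩
        · intro hcon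
          exact (hall w hcon) ((hmemadd w).2 (Or.inr rfl))
        · intro x hx
          rcases List.mem_cons.1 hx with hx | hx
          · exact hx ▸ hw
          · intro hxs; exact hall x hx ((hmemadd x).2 (Or.inl hxs))
      · rintro ⟨hnd, hall⟩
        have hnd' := List.nodup_cons.1 hnd
        refine ⟨hnd'.2, ?_⟩
        intro x hx hxadd
        rcases (hmemadd x).1 hxadd with hxs | hxw
        · exact hall x (List.mem_cons_of_mem _ hx) hxs
        · exact hnd'.1 (hxw ▸ hx)

-- on a ≤-sorted list, the adjacent-pairs scan decides Nodup
theorem pvAdjAllNe_iff (l : List String) (hs : l.Pairwise (· ≤ ·)) :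
    pvAdjAllNe l = true ↔ l.Nodup := by
  induction l with
  | nil => simp [pvAdjAllNe, PySem.List.slice_from_one]
  | cons a t ih =>
    match t, hs with
    | [], _ => simp [pvAdjAllNe, PySem.List.slice_from_one]
    | b :: t', hs =>
      have hab : a ≤ b := (List.pairwise_cons.1 hs).1 b (by simp)
      have htp : (b :: t').Pairwise (· ≤ ·) := (List.pairwise_cons.1 hs).2
      have hbt : ∀ x ∈ t', b ≤ x := (List.pairwise_cons.1 htp).1
      have ihx := ih htp
      simp only [pvAdjAllNe, PySem.List.slice_from_one, List.tail_cons, List.zip_cons_cons,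
        List.all_cons, Bool.and_eq_true, bne_iff_ne, ne_eq] at ihx ⊢
      constructor
      · rintro ⟨hne, hrest⟩
        have hnd := ihx.1 hrest
        refine List.nodup_cons.2 ⟨?_, hnd⟩
        intro hmem
        rcases List.mem_cons.1 hmem with h | h
        · exact hne h
        · exact absurd ((lt_of_le_of_ne hab hne).trans_le (hbt a h)) (lt_irrefl a)
      · intro hnd
        have hnd' := List.nodup_cons.1 hnd
        exact ⟨fun h => hnd'.1 (h ▸ List.mem_cons_self), ihx.2 hnd'.2⟩

-- ===== VERDICT (by name: the statement is the Claim_ definition above) =====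
theorem is_phrase_valid1_spec : Claim_equal_is_phrase_valid1 := by
  intro phrase _
  unfold Spec_is_phrase_valid1 is_phrase_valid1 is_phrase_valid1_alt
  set ws := pvSplitSpace phrase with hws
  have hperm : (PySem.List.sorted ws (fun x => x) false).Perm ws := PySem.List.sorted_perm ws _ _
  have hA : pvLoopA ws PySem.Set.empty = true ↔ ws.Nodup := by
    rw [pvLoopA_iff]; simp [PySem.Set.empty]
  have hB : pvAdjAllNe (PySem.List.sorted ws (fun x => x) false) = true ↔ ws.Nodup := by
    rw [pvAdjAllNe_iff _ (by simpa using PySem.List.sorted_pairwise ws (fun x => x))]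
    exact hperm.nodup_iff
  rw [Bool.eq_iff_iff, hA, hB]
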